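-- pv_equiv track=rewrite | github.com/allchemy-net/MCRcode | paths.py | checkTopoOrderProtic
-- ===== SOURCE A (Python) =====
-- def checkTopoOrderProtic(topoSort, rxdb):
--     proticCond = [rxdb[rx]['protic/aprotic'] for rx in topoSort]
--     if 'P' in proticCond and 'AP' in proticCond:
--         P = [poz for poz, pc in enumerate(proticCond) if pc == 'P']
--         AP = [poz for poz, pc in enumerate(proticCond) if pc == 'AP']
--         if min(P) < max(AP):
--             return False
--     return True
-- ===== SOURCE B (Python) =====
-- def checkTopoOrderProtic(topoSort, rxdb):
--     proticCond = [rxdb[rx]['protic/aprotic'] for rx in topoSort]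
--     seenP = False
--     for pc in proticCond:
--         if pc == 'P':
--             seenP = True
--         elif pc == 'AP' and seenP:
--             return False
--     return True
-- ===== Notes on version B (the rewrite author's own statement) =====
-- stated objective: simpler
-- what changed: Replaces the membership tests, the two enumerate-filtered index lists and the min/max comparison with a single forward scan over proticCond that tracks a seenP flag and fails on the first 'AP' after a 'P'.
import Mathlib
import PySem

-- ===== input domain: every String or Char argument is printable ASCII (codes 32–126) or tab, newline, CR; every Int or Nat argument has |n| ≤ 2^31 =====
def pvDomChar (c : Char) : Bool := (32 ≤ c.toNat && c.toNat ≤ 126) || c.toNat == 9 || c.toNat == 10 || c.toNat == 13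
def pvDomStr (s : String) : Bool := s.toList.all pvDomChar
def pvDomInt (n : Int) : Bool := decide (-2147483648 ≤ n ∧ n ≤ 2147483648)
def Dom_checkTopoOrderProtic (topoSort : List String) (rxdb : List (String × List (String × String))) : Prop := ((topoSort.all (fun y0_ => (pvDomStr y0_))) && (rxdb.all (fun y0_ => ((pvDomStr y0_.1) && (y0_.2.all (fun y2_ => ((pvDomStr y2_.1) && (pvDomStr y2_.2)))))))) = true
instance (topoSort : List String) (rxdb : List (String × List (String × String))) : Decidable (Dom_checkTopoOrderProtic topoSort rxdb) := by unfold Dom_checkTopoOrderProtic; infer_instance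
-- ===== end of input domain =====

-- B replaces A's membership tests + two index-list builds + min/max comparison with one
-- forward scan keeping a seenP flag (objective: simpler).  Both build proticCond the same way.

-- shared helper: rxdb[rx]['protic/aprotic'] (dict lookup = first matching key; none = KeyError)
def pvProtic (rxdb : List (String × List (String × String))) (rx : String) : Option String :=
  ((rxdb.find? (fun p => p.1 == rx)).map (·.2)).bind
    (fun d => (d.find? (fun p => p.1 == "protic/aprotic")).map (·.2))

-- ===== PORT A =====
def checkTopoOrderProtic (topoSort : List String) (rxdb : List (String × List (String × String))) : Bool :=
  match topoSort.mapM (pvProtic rxdb) with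
  | none => true      -- Python raises KeyError here; excluded by Pre_
  | some proticCond =>
    if proticCond.contains "P" && proticCond.contains "AP" then
      let P := (PySem.List.enumerate proticCond 0).filterMap
        (fun p => if p.2 = "P" then some p.1 else none)
      let AP := (PySem.List.enumerate proticCond 0).filterMap
        (fun p => if p.2 = "AP" then some p.1 else none)
      match PySem.List.min? P (fun x => x), PySem.List.max? AP (fun x => x) with
      | some mp, some ma => if mp < ma then false else true
      | _, _ => true    -- unreachable: both lists are nonempty here
    else true

-- ===== PORT B =====
def pvScan : List String → Bool → Bool
  | [], _ => true
  | pc :: rest, seenP =>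
    if pc = "P" then pvScan rest true
    else if pc = "AP" ∧ seenP = true then false
    else pvScan rest seenP

def checkTopoOrderProtic_alt (topoSort : List String) (rxdb : List (String × List (String × String))) : Bool :=
  match topoSort.mapM (pvProtic rxdb) with
  | none => true      -- Python raises KeyError here; excluded by Pre_
  | some proticCond => pvScan proticCond false

-- ===== PRECONDITION & SPEC =====
-- Pre_ excludes exactly the inputs on which A raises KeyError: some rx of topoSort is missing
-- from rxdb, or its entry lacks the 'protic/aprotic' key.
def Pre_checkTopoOrderProtic (topoSort : List String) (rxdb : List (String × List (String × String))) : Prop :=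
  ∀ rx ∈ topoSort,
    (((rxdb.find? (fun p => p.1 == rx)).map (·.2)).any
      (fun d => (d.find? (fun p => p.1 == "protic/aprotic")).isSome)) = true
instance (topoSort : List String) (rxdb : List (String × List (String × String))) : Decidable (Pre_checkTopoOrderProtic topoSort rxdb) := by unfold Pre_checkTopoOrderProtic; infer_instance

def pvWitness_checkTopoOrderProtic : List String × (List (String × List (String × String))) :=
  (["r1", "r2"], [("r1", [("protic/aprotic", "P")]), ("r2", [("protic/aprotic", "AP")])])

def Spec_checkTopoOrderProtic (topoSort : List String) (rxdb : List (String × List (String × String))) (out : Bool) : Prop := out = checkTopoOrderProtic_alt topoSort rxdb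
instance (topoSort : List String) (rxdb : List (String × List (String × String))) (out : Bool) : Decidable (Spec_checkTopoOrderProtic topoSort rxdb out) := by unfold Spec_checkTopoOrderProtic; infer_instance

-- ===== CLAIM (what is proved, stated in full; the proofs are below) =====
def Claim_equal_checkTopoOrderProtic : Prop := ∀ (topoSort : List String) (rxdb : List (String × List (String × String))), Dom_checkTopoOrderProtic topoSort rxdb → Pre_checkTopoOrderProtic topoSort rxdb → Spec_checkTopoOrderProtic topoSort rxdb (checkTopoOrderProtic topoSort rxdb)

-- ===== LEMMAS AND PROOFS =====

-- "a P occurs strictly before an AP"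
def pvPairEx (pc : List String) : Prop :=
  ∃ (i j : Nat) (hi : i < pc.length) (hj : j < pc.length), i < j ∧ pc[i] = "P" ∧ pc[j] = "AP"

theorem pvScan_true_false_iff (pc : List String) : pvScan pc true = false ↔ "AP" ∈ pc := by
  induction pc with
  | nil => simp [pvScan]
  | cons x rest ih =>
    by_cases hx : x = "P"
    · subst hx; simp_all [pvScan]
    · by_cases hx2 : x = "AP"
      · subst hx2; simp [pvScan]
      · rw [show pvScan (x :: rest) true = pvScan rest true from by simp [pvScan, hx, hx2]]
        rw [ih, List.mem_cons]
        exact ⟨Or.inr, fun h => h.resolve_left (fun e => hx2 e.symm)⟩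

theorem pvPairEx_cons_P (rest : List String) : pvPairEx ("P" :: rest) ↔ "AP" ∈ rest := by
  constructor
  · rintro ⟨i, j, hi, hj, hij, _, hjv⟩
    match j, hij with
    | j + 1, _ =>
      simp only [List.getElem_cons_succ] at hjv
      exact hjv ▸ List.getElem_mem _
  · intro h
    obtain ⟨j, hj, hjv⟩ := List.mem_iff_getElem.mp h
    exact ⟨0, j + 1, by simp, by simpa using Nat.succ_lt_succ hj, Nat.succ_pos j, rfl, by simpa using hjv⟩

theorem pvPairEx_cons_notP (x : String) (rest : List String) (hx : x ≠ "P") :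
    pvPairEx (x :: rest) ↔ pvPairEx rest := by
  constructor
  · rintro ⟨i, j, hi, hj, hij, hiv, hjv⟩
    match i, j, hij with
    | 0, _, _ => simp only [List.getElem_cons_zero] at hiv; exact absurd hiv hx
    | i + 1, j + 1, h =>
      exact ⟨i, j, by simpa using hi, by simpa using hj, Nat.lt_of_succ_lt_succ h,
        by simpa using hiv, by simpa using hjv⟩
  · rintro ⟨i, j, hi, hj, hij, hiv, hjv⟩
    exact ⟨i + 1, j + 1, Nat.succ_lt_succ hi, Nat.succ_lt_succ hj, Nat.succ_lt_succ hij,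
      by simpa using hiv, by simpa using hjv⟩

theorem pvScan_false_iff (pc : List String) : pvScan pc false = false ↔ pvPairEx pc := by
  induction pc with
  | nil => simp [pvScan, pvPairEx]
  | cons x rest ih =>
    by_cases hx : x = "P"
    · subst hx
      rw [show pvScan ("P" :: rest) false = pvScan rest true from by simp [pvScan]]
      rw [pvScan_true_false_iff, pvPairEx_cons_P]
    · rw [show pvScan (x :: rest) false = pvScan rest false from by simp [pvScan, hx]]
      rw [ih, pvPairEx_cons_notP x rest hx]

-- membership in A's index lists
theorem pv_mem_idxList (pc : List String) (v : String) (x : Int) :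
    x ∈ (PySem.List.enumerate pc 0).filterMap (fun p => if p.2 = v then some p.1 else none) ↔
      ∃ (k : Nat) (hk : k < pc.length), pc[k] = v ∧ x = (k : Int) := by
  simp only [List.mem_filterMap, PySem.List.mem_enumerate_iff]
  constructor
  · rintro ⟨⟨a, b⟩, ⟨k, hk, hab⟩, hif⟩
    obtain ⟨ha, hb⟩ := Prod.mk.injEq .. ▸ hab
    subst ha hb
    by_cases hv : pc[k] = v
    · rw [if_pos hv] at hif
      injection hif with hif
      exact ⟨k, hk, hv, by omega⟩
    · simp [hv] at hif
  · rintro ⟨k, hk, hv, hx⟩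
    exact ⟨((k : Int), pc[k]), ⟨k, hk, by simp⟩, by simp [hv, hx]⟩

theorem pvAcore_false_iff (pc : List String) :
    (if pc.contains "P" && pc.contains "AP" then
      match PySem.List.min? ((PySem.List.enumerate pc 0).filterMap
              (fun p => if p.2 = "P" then some p.1 else none)) (fun x => x),
            PySem.List.max? ((PySem.List.enumerate pc 0).filterMap
              (fun p => if p.2 = "AP" then some p.1 else none)) (fun x => x) with
      | some mp, some ma => if mp < ma then false else true
      | _, _ => true
     else true) = false ↔ pvPairEx pc := by
  constructor
  · intro h
    split at h
    · rename_i hmem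
      split at h
      · rename_i mp ma hmp hma
        split at h
        · rename_i hlt
          obtain ⟨i, hi, hiv, hmpv⟩ := (pv_mem_idxList pc "P" mp).mp (PySem.List.min?_mem hmp)
          obtain ⟨j, hj, hjv, hmav⟩ := (pv_mem_idxList pc "AP" ma).mp (PySem.List.max?_mem hma)
          exact ⟨i, j, hi, hj, by omega, hiv, hjv⟩
        · exact absurd h (by simp)
      · exact absurd h (by simp)
    · exact absurd h (by simp)
  · rintro ⟨i, j, hi, hj, hij, hiv, hjv⟩
    have hPmem : ((i : Int)) ∈ (PySem.List.enumerate pc 0).filterMap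
        (fun p => if p.2 = "P" then some p.1 else none) :=
      (pv_mem_idxList pc "P" i).mpr ⟨i, hi, hiv, rfl⟩
    have hAPmem : ((j : Int)) ∈ (PySem.List.enumerate pc 0).filterMap
        (fun p => if p.2 = "AP" then some p.1 else none) :=
      (pv_mem_idxList pc "AP" j).mpr ⟨j, hj, hjv, rfl⟩
    have hPm : "P" ∈ pc := hiv ▸ pc.getElem_mem hi
    have hAPm : "AP" ∈ pc := hjv ▸ pc.getElem_mem hj
    rw [if_pos (by simp [hPm, hAPm])]
    cases hmp : PySem.List.min? ((PySem.List.enumerate pc 0).filterMap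
        (fun p => if p.2 = "P" then some p.1 else none)) (fun x => x) with
    | none =>
      rw [PySem.List.min?_eq_none_iff] at hmp
      simp [hmp] at hPmem
    | some mp =>
      cases hma : PySem.List.max? ((PySem.List.enumerate pc 0).filterMap
          (fun p => if p.2 = "AP" then some p.1 else none)) (fun x => x) with
      | none =>
        rw [PySem.List.max?_eq_none_iff] at hma
        simp [hma] at hAPmem
      | some ma =>
        have h1 : mp ≤ (i : Int) := PySem.List.min?_isMin hmp _ hPmem
        have h2 : (j : Int) ≤ ma := PySem.List.max?_isMax hma _ hAPmem
        have : mp < ma := by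
          have : (i : Int) < (j : Int) := by exact_mod_cast hij
          omega
        simp [this]

theorem pv_core_eq (pc : List String) :
    (if pc.contains "P" && pc.contains "AP" then
      match PySem.List.min? ((PySem.List.enumerate pc 0).filterMap
              (fun p => if p.2 = "P" then some p.1 else none)) (fun x => x),
            PySem.List.max? ((PySem.List.enumerate pc 0).filterMap
              (fun p => if p.2 = "AP" then some p.1 else none)) (fun x => x) with
      | some mp, some ma => if mp < ma then false else true
      | _, _ => true
     else true) = pvScan pc false := by
  have h1 := pvAcore_false_iff pc
  have h2 := pvScan_false_iff pc
  cases ha : (if pc.contains "P" && pc.contains "AP" then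
      match PySem.List.min? ((PySem.List.enumerate pc 0).filterMap
              (fun p => if p.2 = "P" then some p.1 else none)) (fun x => x),
            PySem.List.max? ((PySem.List.enumerate pc 0).filterMap
              (fun p => if p.2 = "AP" then some p.1 else none)) (fun x => x) with
      | some mp, some ma => if mp < ma then false else true
      | _, _ => true
     else true) with
  | false => rw [ha] at h1; exact (h2.mpr (h1.mp rfl)).symm
  | true =>
    rw [ha] at h1
    cases hb : pvScan pc false with
    | true => rfl
    | false => exact absurd (h1.mpr (h2.mp hb)) (by simp)

-- ===== VERDICT (by name: the statement is the Claim_ definition above) =====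
theorem checkTopoOrderProtic_spec : Claim_equal_checkTopoOrderProtic := by
  intro topoSort rxdb _ _
  unfold Spec_checkTopoOrderProtic checkTopoOrderProtic checkTopoOrderProtic_alt
  cases h : topoSort.mapM (pvProtic rxdb) with
  | none => rfl
  | some pc => exact pv_core_eq pc
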